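-- pv_equiv track=rewrite | github.com/mkgorka/algorithms | nearest-fibonacci-number/main.py | nearest_fibonacci
-- ===== SOURCE A (Python) =====
-- def nearest_fibonacci(number: int):
--     """Finds the nearest Fibonacci number to a given positive integer(number).
--     If there are more than one Fibonacci numbers with equal distance to the given number, return the smallest one."""
--
--     fib_numbers = [0, 1]
--     num_1, num_2 = 0, 1
--     min_diff = number
--     nearest_fib_number: int
--     min_diff_dct = {}
--
--     while num_2 < number:
--         next_num = num_1 + num_2
--         fib_numbers.append(next_num)
--         num_1 = num_2
--         num_2 = next_num
--
--     if number in fib_numbers: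
--         nearest_fib_number = number
--     else:
--         for numb in fib_numbers:
--             num_diff = abs(numb - number)
--             if num_diff <= min_diff:
--                 min_diff = num_diff
--                 min_diff_dct[numb] = min_diff
--         nearest_fib_number = min(min_diff_dct, key=min_diff_dct.get)
--     return nearest_fib_number
-- ===== SOURCE B (Python) =====
-- def nearest_fibonacci(number: int):
--     """Walk the Fibonacci pair up to the first value >= number and compare
--     the two bracketing candidates directly (no list, no dict, no second scan)."""
--     num_1, num_2 = 0, 1
--     while num_2 < number:
--         num_1, num_2 = num_2, num_1 + num_2
--     if abs(num_1 - number) <= abs(num_2 - number):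
--         return num_1
--     return num_2
-- ===== Notes on version B (the rewrite author's own statement) =====
-- stated objective: simpler
-- what changed: B keeps only the advancing Fibonacci pair and returns the closer of the two values bracketing number by one comparison (<= ties toward the smaller fib), instead of A's stored fib list, membership test, second scan with a running minimum and dict, and a min-by-value pass over the dict.
import Mathlib
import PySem

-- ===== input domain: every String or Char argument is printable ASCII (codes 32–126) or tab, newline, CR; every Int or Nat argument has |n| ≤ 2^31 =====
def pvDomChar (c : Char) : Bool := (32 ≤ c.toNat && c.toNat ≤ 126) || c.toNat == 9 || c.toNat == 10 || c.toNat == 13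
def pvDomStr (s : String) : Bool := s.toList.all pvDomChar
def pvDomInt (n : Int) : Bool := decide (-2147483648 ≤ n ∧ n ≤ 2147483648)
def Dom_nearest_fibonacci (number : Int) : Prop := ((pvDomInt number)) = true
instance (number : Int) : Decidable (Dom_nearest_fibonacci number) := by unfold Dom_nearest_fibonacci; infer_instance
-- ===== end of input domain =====

-- B keeps only the advancing Fibonacci pair and picks the closer of the two bracketing
-- values by one comparison, instead of A's stored list, second scan, dict and min pass
-- (objective: simpler). Equality of the return value is proved for all number ≥ 0.

-- ===== PORT A =====
-- the 'while num_2 < number' loop, appending to fib_numbers; fuel-guarded for totality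
-- (fuel number.toNat + 2 always exceeds the iteration count, since num_2 ≥ k after k iterations)
def pvFibLoopA (number : Int) : Nat → Int → Int → List Int → List Int
  | 0, _, _, fib => fib
  | f + 1, n1, n2, fib =>
    if n2 < number then pvFibLoopA number f n2 (n1 + n2) (fib ++ [n1 + n2]) else fib

-- min(dct, key=dct.get): first key whose value is strictly smallest, over the items in
-- insertion order; Python raises ValueError on an empty dict (only reachable for number < 0,
-- excluded by Pre_), the port returns 0 there
def pvMinByGet (items : List (Int × Int)) : Int :=
  match items with
  | [] => 0
  | e :: rest => (rest.foldl (fun best kv => if kv.2 < best.2 then kv else best) e).1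

def nearest_fibonacci (number : Int) : Int :=
  let fib := pvFibLoopA number (number.toNat + 2) 0 1 [0, 1]
  if number ∈ fib then number
  else
    let st := fib.foldl
      (fun (p : Int × PySem.Dict Int Int) numb =>
        if |numb - number| ≤ p.1 then (|numb - number|, p.2.insert numb (|numb - number|)) else p)
      (number, PySem.Dict.empty)
    pvMinByGet st.2.items

-- ===== PORT B =====
-- the same while loop shape, but keeping only the pair (num_1, num_2)
def pvFibLoopB (number : Int) : Nat → Int → Int → Int × Int
  | 0, n1, n2 => (n1, n2)
  | f + 1, n1, n2 => if n2 < number then pvFibLoopB number f n2 (n1 + n2) else (n1, n2)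

def nearest_fibonacci_alt (number : Int) : Int :=
  let p := pvFibLoopB number (number.toNat + 2) 0 1
  if |p.1 - number| ≤ |p.2 - number| then p.1 else p.2

-- ===== PRECONDITION & SPEC =====
-- Pre_ excludes exactly the negative inputs, on which A's candidate dict stays empty and
-- Python's min() raises ValueError; B's bracket compare still returns a value there.
def Pre_nearest_fibonacci (number : Int) : Prop := 0 ≤ number
instance (number : Int) : Decidable (Pre_nearest_fibonacci number) := by unfold Pre_nearest_fibonacci; infer_instance
def pvWitness_nearest_fibonacci : Int := 10

def Spec_nearest_fibonacci (number : Int) (out : Int) : Prop := out = nearest_fibonacci_alt number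
instance (number : Int) (out : Int) : Decidable (Spec_nearest_fibonacci number out) := by unfold Spec_nearest_fibonacci; infer_instance

-- ===== CLAIM (what is proved, stated in full; the proofs are below) =====
def Claim_equal_nearest_fibonacci : Prop := ∀ (number : Int), Dom_nearest_fibonacci number → Pre_nearest_fibonacci number → Spec_nearest_fibonacci number (nearest_fibonacci number)

-- ===== LEMMAS AND PROOFS =====

-- The two loops run in lockstep: A's list is always (a prefix of values < number) ++ [n1, n2],
-- nondecreasing, starting at 0; with enough fuel the final n2 reaches number.
theorem pvLoop_spec (number : Int) :
    ∀ (f : Nat) (n1 n2 : Int) (pre : List Int),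
    (pre ++ [n1, n2]).head? = some 0 →
    List.IsChain (· ≤ ·) (pre ++ [n1, n2]) →
    (∀ x ∈ pre ++ [n1], 0 ≤ x ∧ x < number) →
    1 ≤ n2 →
    (number - n1 - n2).toNat + 2 ≤ f →
    ∃ pre2 a b,
      pvFibLoopB number f n1 n2 = (a, b) ∧
      pvFibLoopA number f n1 n2 (pre ++ [n1, n2]) = pre2 ++ [a, b] ∧
      (pre2 ++ [a, b]).head? = some 0 ∧
      List.IsChain (· ≤ ·) (pre2 ++ [a, b]) ∧
      (∀ x ∈ pre2 ++ [a], 0 ≤ x ∧ x < number) ∧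
      1 ≤ b ∧ number ≤ b := by
  intro f
  induction f with
  | zero => intro n1 n2 pre _ _ _ _ hfuel; omega
  | succ f ih =>
    intro n1 n2 pre hhead hchain hsm hn2 hfuel
    obtain ⟨hn10, hn1lt⟩ := hsm n1 (by simp)
    by_cases h : n2 < number
    · -- loop body runs: new state (n2, n1+n2), list gains n1+n2
      have hlist : (pre ++ [n1, n2]) ++ [n1 + n2] = (pre ++ [n1]) ++ [n2, n1 + n2] := by simp
      have hhead2 : ((pre ++ [n1]) ++ [n2, n1 + n2]).head? = some 0 := by
        rw [← hlist, List.head?_append, hhead]; rfl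
      have hchain2 : List.IsChain (· ≤ ·) ((pre ++ [n1]) ++ [n2, n1 + n2]) := by
        rw [← hlist]
        refine List.isChain_append.mpr ⟨hchain, by simp, ?_⟩
        intro x hx y hy
        have hx2 : x = n2 := by
          have hgl : (pre ++ [n1, n2]).getLast? = some n2 := by
            rw [show pre ++ [n1, n2] = (pre ++ [n1]) ++ [n2] by simp, List.getLast?_concat]
          rw [hgl] at hx; exact (Option.some_inj.mp hx).symm
        have hy2 : y = n1 + n2 := by have := hy; simp at this; omega
        omega
      have hsm2 : ∀ x ∈ (pre ++ [n1]) ++ [n2], 0 ≤ x ∧ x < number := by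
        intro x hx
        rcases (by simp at hx ⊢; tauto : x ∈ pre ++ [n1] ∨ x = n2) with hx | rfl
        · exact hsm x hx
        · exact ⟨by omega, h⟩
      by_cases hbig : number ≤ n1 + n2
      · -- one more iteration, then the loop exits
        obtain ⟨g, rfl⟩ : ∃ g, f = g + 1 := ⟨f - 1, by omega⟩
        refine ⟨pre ++ [n1], n2, n1 + n2, ?_, ?_, hhead2, hchain2, hsm2, by omega, by omega⟩
        · simp [pvFibLoopB, h, show ¬ n1 + n2 < number by omega]
        · simp only [pvFibLoopA, if_pos h, if_neg (show ¬ n1 + n2 < number by omega)]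
          exact hlist
      · -- strictly more work to do; the fuel bound decreases
        have step : pvFibLoopA number (f + 1) n1 n2 (pre ++ [n1, n2]) =
            pvFibLoopA number f n2 (n1 + n2) ((pre ++ [n1]) ++ [n2, n1 + n2]) := by
          conv_lhs => rw [pvFibLoopA, if_pos h, hlist]
        have stepB : pvFibLoopB number (f + 1) n1 n2 = pvFibLoopB number f n2 (n1 + n2) := by
          rw [pvFibLoopB, if_pos h]
        rw [step, stepB]
        exact ih n2 (n1 + n2) (pre ++ [n1]) hhead2 hchain2 hsm2 (by omega) (by omega)
    · -- loop exits immediately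
      refine ⟨pre, n1, n2, ?_, ?_, hhead, hchain, hsm, hn2, by omega⟩
      · simp [pvFibLoopB, h]
      · simp [pvFibLoopA, h]

-- Python's min over the dict: the entry (k, v) wins when everything before it is strictly
-- larger and everything after it is at least v.
theorem pvPick_after (k v : Int) :
    ∀ (ys : List (Int × Int)), (∀ e ∈ ys, v ≤ e.2) →
    List.foldl (fun best kv => if kv.2 < best.2 then kv else best) ((k, v) : Int × Int) ys = (k, v) := by
  intro ys
  induction ys with
  | nil => intro _; rfl
  | cons e ys ih =>
    intro h
    have he : v ≤ e.2 := h e (by simp)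
    simp only [List.foldl_cons, if_neg (by omega : ¬ e.2 < v)]
    exact ih (fun e' he' => h e' (by simp [he']))

theorem pvPick_before (k v : Int) (ys : List (Int × Int)) (hys : ∀ e ∈ ys, v ≤ e.2) :
    ∀ (xs : List (Int × Int)) (best : Int × Int), v < best.2 → (∀ e ∈ xs, v < e.2) →
    List.foldl (fun best kv => if kv.2 < best.2 then kv else best) best (xs ++ (k, v) :: ys) = (k, v) := by
  intro xs
  induction xs with
  | nil =>
    intro best hb _
    simp only [List.nil_append, List.foldl_cons, if_pos hb]
    exact pvPick_after k v ys hys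
  | cons x xs ih =>
    intro best hb hxs
    have hx : v < x.2 := hxs x (by simp)
    simp only [List.cons_append, List.foldl_cons]
    by_cases h : x.2 < best.2
    · rw [if_pos h]; exact ih x hx (fun e he => hxs e (by simp [he]))
    · rw [if_neg h]; exact ih best hb (fun e he => hxs e (by simp [he]))

theorem pvMinByGet_spec (xs : List (Int × Int)) (k v : Int) (ys : List (Int × Int))
    (h1 : ∀ e ∈ xs, v < e.2) (h2 : ∀ e ∈ ys, v ≤ e.2) :
    pvMinByGet (xs ++ (k, v) :: ys) = k := by
  cases xs with
  | nil => simp only [List.nil_append, pvMinByGet]; rw [pvPick_after k v ys h2]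
  | cons x xs =>
    simp only [List.cons_append, pvMinByGet]
    rw [pvPick_before k v ys h2 xs x (h1 x (by simp)) (fun e he => h1 e (by simp [he]))]

-- A's scan over the values below number: every element is inserted, the dict's keys stay
-- strictly increasing with value number - key, and min_diff tracks the last element seen.
theorem pvFold_spec (number : Int) :
    ∀ (S : List Int) (ks : List Int) (c : Int) (d : PySem.Dict Int Int),
    List.IsChain (· ≤ ·) (c :: S) →
    (∀ x ∈ S, x < number) → c < number →
    List.IsChain (· < ·) (ks ++ [c]) →
    d.items = (ks ++ [c]).map (fun k => (k, number - k)) →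
    ∃ (ks2 : List Int) (d2 : PySem.Dict Int Int),
      S.foldl
        (fun (p : Int × PySem.Dict Int Int) numb =>
          if |numb - number| ≤ p.1 then (|numb - number|, p.2.insert numb (|numb - number|)) else p)
        (number - c, d) = (number - S.getLastD c, d2) ∧
      List.IsChain (· < ·) (ks2 ++ [S.getLastD c]) ∧
      d2.items = (ks2 ++ [S.getLastD c]).map (fun k => (k, number - k)) := by
  intro S
  induction S with
  | nil => intro ks c d _ _ _ hks hd; exact ⟨ks, d, rfl, hks, hd⟩
  | cons x S ih =>
    intro ks c d hchain hS hc hks hd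
    have hcx : c ≤ x := (List.isChain_cons_cons.mp hchain).1
    have hx : x < number := hS x (by simp)
    have habs : |x - number| = number - x := by rw [abs_of_nonpos (by omega)]; ring
    have hkeys : d.keys = ks ++ [c] := by
      show d.items.map (·.1) = ks ++ [c]
      rw [hd, List.map_map]
      exact (List.map_congr_left (fun k _ => rfl)).trans (List.map_id _)
    have hksc : ∀ k ∈ ks, k < c := by
      intro k hk
      exact (List.pairwise_append.mp hks.pairwise).2.2 k hk c (by simp)
    simp only [List.foldl_cons, List.getLastD_cons, habs,
      if_pos (show number - x ≤ ((number - c, d) : Int × PySem.Dict Int Int).1 by simp only []; omega)]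
    rcases eq_or_lt_of_le hcx with rfl | hlt
    · -- x = c: overwrite of the last entry with the same value
      have hcont : d.contains c = true := by
        rw [PySem.Dict.contains_eq_decide_mem_keys, hkeys]; simp
      have hdI : (d.insert c (number - c)).items = (ks ++ [c]).map (fun k => (k, number - k)) := by
        rw [PySem.Dict.items_insert_of_contains _ _ hcont, hd, List.map_map]
        refine List.map_congr_left ?_
        intro k hk
        rcases (by simpa using hk : k ∈ ks ∨ k = c) with hk | rfl
        · have hne : k ≠ c := by have := hksc k hk; omega
          simp [Function.comp, hne]
        · simp
      exact ih ks c _ hchain.of_cons (fun y hy => hS y (by simp [hy])) hc hks hdI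
    · -- c < x: a fresh key is appended
      have hncont : d.contains x = false := by
        rw [PySem.Dict.contains_eq_decide_mem_keys, hkeys]
        simp only [decide_eq_false_iff_not, List.mem_append, List.mem_singleton]
        rintro (hk | rfl)
        · have := hksc x hk; omega
        · omega
      have hdI : (d.insert x (number - x)).items =
          ((ks ++ [c]) ++ [x]).map (fun k => (k, number - k)) := by
        rw [PySem.Dict.items_insert_of_not_contains _ _ hncont, hd]; simp
      have hksI : List.IsChain (· < ·) ((ks ++ [c]) ++ [x]) := by
        refine List.isChain_append.mpr ⟨hks, by simp, ?_⟩
        intro u hu y hy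
        rw [List.getLast?_concat] at hu
        have hu2 : u = c := (Option.some_inj.mp hu).symm
        have hy2 : y = x := by have := hy; simp at this; omega
        omega
      exact ih (ks ++ [c]) x _ hchain.of_cons (fun y hy => hS y (by simp [hy])) hx hksI hdI

-- ===== VERDICT (by name: the statement is the Claim_ definition above) =====
theorem nearest_fibonacci_spec : Claim_equal_nearest_fibonacci := by
  intro number _ hpre
  unfold Pre_nearest_fibonacci at hpre
  unfold Spec_nearest_fibonacci
  by_cases h0 : number = 0
  · subst h0; decide
  by_cases h1 : number = 1
  · subst h1; decide
  have h2 : 2 ≤ number := by omega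
  obtain ⟨pre2, a, b, hB, hA, hhead, hchain, hsm, hb1, hble⟩ :=
    pvLoop_spec number (number.toNat + 2) 0 1 [] (by simp)
      (by simp [List.isChain_cons_cons]) (by intro x hx; simp at hx; omega) (by omega) (by omega)
  simp only [List.nil_append] at hA hB
  have ha : a < number := (hsm a (by simp)).2
  have ha0 : 0 ≤ a := (hsm a (by simp)).1
  unfold nearest_fibonacci nearest_fibonacci_alt
  rw [hA, hB]
  by_cases hmem : number ∈ pre2 ++ [a, b]
  · -- number is itself a Fibonacci number: it must be b, and B returns b
    rw [if_pos hmem]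
    have hb : b = number := by
      rcases (by simp at hmem ⊢; tauto : number ∈ pre2 ++ [a] ∨ number = b) with hin | rfl
      · exact absurd (hsm number hin).2 (by omega)
      · rfl
    have hcond : ¬ |a - number| ≤ |b - number| := by
      rw [abs_of_nonpos (by omega), abs_of_nonneg (by omega)]; omega
    rw [if_neg hcond]; omega
  · rw [if_neg hmem]
    have hbgt : number < b := by
      rcases lt_or_eq_of_le hble with h | h
      · exact h
      · exact absurd (h ▸ (by simp : b ∈ pre2 ++ [a, b])) hmem
    -- the part of the list below number starts with 0
    obtain ⟨P, hP⟩ : ∃ P, pre2 ++ [a] = 0 :: P := by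
      cases hpre2 : pre2 with
      | nil =>
        refine ⟨[], ?_⟩
        have : a = 0 := by
          rw [hpre2] at hhead; have := hhead; simp at this; omega
        simp [this]
      | cons y t =>
        refine ⟨t ++ [a], ?_⟩
        have : y = 0 := by
          rw [hpre2] at hhead; have := hhead; simp at this; omega
        simp [this]
    have hL : pre2 ++ [a, b] = 0 :: (P ++ [b]) := by
      rw [show pre2 ++ [a, b] = (pre2 ++ [a]) ++ [b] by simp, hP]; rfl
    have hchainP : List.IsChain (· ≤ ·) (0 :: P) := by
      have hLc : pre2 ++ [a, b] = (0 :: P) ++ [b] := by rw [hL]; rfl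
      rw [hLc] at hchain
      exact (List.isChain_append.mp hchain).1
    have hPsm : ∀ x ∈ P, x < number := by
      intro x hx
      exact (hsm x (by rw [hP]; simp [hx])).2
    rw [hL]
    simp only [List.foldl_cons]
    have habs0 : |(0 : Int) - number| = number - 0 := by
      rw [abs_of_nonpos (by omega)]; ring
    rw [habs0, if_pos (by norm_num :
      (number - 0 : Int) ≤ ((number, (PySem.Dict.empty : PySem.Dict Int Int)) : Int × PySem.Dict Int Int).1)]
    have hd0 : ((PySem.Dict.empty : PySem.Dict Int Int).insert 0 (number - 0)).items =
        (([] : List Int) ++ [0]).map (fun k => (k, number - k)) := by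
      rw [PySem.Dict.items_insert_of_not_contains _ _ (by rfl)]; rfl
    obtain ⟨ks2, d2, hfold, hchain2, hitems2⟩ :=
      pvFold_spec number P [] 0 _ hchainP hPsm (by omega) (by simp) hd0
    have hc2 : P.getLastD 0 = a := by
      have hgl : (pre2 ++ [a]).getLastD 0 = a := List.getLastD_concat
      rw [hP, List.getLastD_cons] at hgl
      exact hgl
    rw [hc2] at hfold hchain2 hitems2
    rw [List.foldl_append, hfold, List.foldl_cons, List.foldl_nil]
    have habsb : |b - number| = b - number := abs_of_nonneg (by omega)
    have habsa : |a - number| = number - a := by rw [abs_of_nonpos (by omega)]; ring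
    have hks2a : ∀ k ∈ ks2, k < a := by
      intro k hk
      exact (List.pairwise_append.mp hchain2.pairwise).2.2 k hk a (by simp)
    have hitems2' : d2.items = ks2.map (fun k => (k, number - k)) ++ [(a, number - a)] := by
      rw [hitems2]; simp
    rw [habsb]
    by_cases hcase : b - number ≤ number - a
    · rw [if_pos (by norm_num; omega : (b - number : Int) ≤ ((number - a, d2) : Int × PySem.Dict Int Int).1)]
      have hfresh : d2.contains b = false := by
        rw [PySem.Dict.contains_eq_decide_mem_keys]
        have hkeys2 : d2.keys = ks2 ++ [a] := by
          show d2.items.map (·.1) = ks2 ++ [a]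
          rw [hitems2, List.map_map]
          exact (List.map_congr_left (fun k _ => rfl)).trans (List.map_id _)
        rw [hkeys2]
        simp only [decide_eq_false_iff_not, List.mem_append, List.mem_singleton]
        rintro (hk | rfl)
        · have := hks2a b hk; omega
        · omega
      have hins : (d2.insert b (b - number)).items =
          ks2.map (fun k => (k, number - k)) ++ (a, number - a) :: [(b, b - number)] := by
        rw [PySem.Dict.items_insert_of_not_contains _ _ hfresh, hitems2']; simp
      rcases lt_or_eq_of_le hcase with hstrict | heq
      · -- b strictly closer: both return b
        have hmin : pvMinByGet (d2.insert b (b - number)).items = b := by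
          rw [hins, show ks2.map (fun k => (k, number - k)) ++ (a, number - a) :: [(b, b - number)] =
            (ks2.map (fun k => (k, number - k)) ++ [(a, number - a)]) ++ (b, b - number) :: [] by simp]
          refine pvMinByGet_spec _ b (b - number) [] ?_ (by simp)
          intro e he
          rcases (by simpa using he : (∃ k ∈ ks2, (k, number - k) = e) ∨ e = (a, number - a)) with ⟨k, hk, rfl⟩ | rfl
          · have := hks2a k hk; simp; omega
          · simp; omega
        rw [hmin, habsa, if_neg (by omega)]
      · -- equidistant: A's dict keeps the earlier key a in front, B ties toward a
        have hmin : pvMinByGet (d2.insert b (b - number)).items = a := by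
          rw [hins]
          refine pvMinByGet_spec _ a (number - a) [(b, b - number)] ?_ (by simp; omega)
          intro e he
          obtain ⟨k, hk, rfl⟩ := (by simpa using he : ∃ k ∈ ks2, (k, number - k) = e)
          have := hks2a k hk; simp; omega
        rw [hmin, habsa, if_pos (by omega)]
    · -- b farther: not inserted, both return a
      rw [if_neg (by norm_num; omega : ¬ (b - number : Int) ≤ ((number - a, d2) : Int × PySem.Dict Int Int).1)]
      have hmin : pvMinByGet d2.items = a := by
        rw [hitems2', show ks2.map (fun k => (k, number - k)) ++ [(a, number - a)] =
          ks2.map (fun k => (k, number - k)) ++ (a, number - a) :: [] by simp]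
        refine pvMinByGet_spec _ a (number - a) [] ?_ (by simp)
        intro e he
        obtain ⟨k, hk, rfl⟩ := (by simpa using he : ∃ k ∈ ks2, (k, number - k) = e)
        have := hks2a k hk; simp; omega
      rw [hmin, habsa, if_pos (by omega)]
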